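-- pv_equiv track=rewrite | github.com/wickedsensation/Splendid | videoProcessingTools.py | validate_and_remove_pairs
-- ===== SOURCE A (Python) =====
-- def validate_and_remove_pairs(arr):
--     i = 0  # Start from the first element
--     # Use while loop because we'll be modifying the array which affects its length
--     while i < len(arr) - 1:
--         # Check if either condition of order is violated
--         if arr[i][1] > arr[i + 1][0] or arr[i][1] > arr[i + 1][1]:
--             arr.pop(i)  # Remove the current pair
--             # Do not increment i, because we need to check the new pair at this index
--         else:
--             i += 1  # Move to the next pair only if the current pair is in correct order
--
--     return arr  # Return the modified array
-- ===== SOURCE B (Python) =====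
-- def validate_and_remove_pairs(arr):
--     # Single forward pass: an element is kept iff it is the last one or it is
--     # ordered w.r.t. its ORIGINAL successor (pops never change later adjacency).
--     # Mutates arr in place like A and returns it.
--     kept = [a for a, b in zip(arr, arr[1:]) if not (a[1] > b[0] or a[1] > b[1])]
--     kept += arr[-1:]
--     arr[:] = kept
--     return arr
-- ===== Notes on version B (the rewrite author's own statement) =====
-- stated objective: alternative
-- what changed: Replaced the index-juggling while-loop with in-place arr.pop(i) by a single forward pass that keeps each element iff it is ordered against its original successor (the last element is always kept), since pops never change later adjacency.
import Mathlib
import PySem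

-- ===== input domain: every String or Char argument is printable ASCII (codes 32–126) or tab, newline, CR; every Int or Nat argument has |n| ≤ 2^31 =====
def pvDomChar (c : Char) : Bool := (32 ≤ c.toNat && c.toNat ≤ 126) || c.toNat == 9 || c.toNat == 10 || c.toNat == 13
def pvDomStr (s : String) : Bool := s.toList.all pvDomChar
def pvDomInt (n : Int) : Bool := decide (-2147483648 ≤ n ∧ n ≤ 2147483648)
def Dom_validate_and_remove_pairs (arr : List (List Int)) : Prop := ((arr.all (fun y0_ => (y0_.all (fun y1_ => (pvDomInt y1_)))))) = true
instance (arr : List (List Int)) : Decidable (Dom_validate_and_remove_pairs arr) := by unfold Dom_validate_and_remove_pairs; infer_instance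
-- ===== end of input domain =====

-- B replaces A's pop-in-place while loop by one forward pass keeping each element
-- iff it is ordered against its original successor (objective: alternative).
-- Python A and B both mutate arr in place and return it; the equivalence proved here
-- is about the returned value (the mutation is identical in both).

-- ===== PORT A =====
-- the while loop: state = current list and current index i; pop keeps i, else i+1
def pvLoopA (arr : List (List Int)) (i : Nat) : List (List Int) :=
  if h : (i : Int) < PySem.List.len arr - 1 then
    if PySem.List.pyGetD (PySem.List.pyGetD arr (i : Int) []) 1 0 >
         PySem.List.pyGetD (PySem.List.pyGetD arr ((i : Int) + 1) []) 0 0 ∨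
       PySem.List.pyGetD (PySem.List.pyGetD arr (i : Int) []) 1 0 >
         PySem.List.pyGetD (PySem.List.pyGetD arr ((i : Int) + 1) []) 1 0 then
      match hp : PySem.List.pop? arr (i : Int) with
      | some r => pvLoopA r.2 i
      | none => arr      -- unreachable: the guard puts i in range
    else
      pvLoopA arr (i + 1)
  else
    arr
termination_by arr.length - i
decreasing_by
  · have := PySem.List.length_of_pop?_eq_some arr hp
    simp [PySem.List.len_eq] at h
    omega
  · simp [PySem.List.len_eq] at h
    omega

def validate_and_remove_pairs (arr : List (List Int)) : List (List Int) :=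
  pvLoopA arr 0

-- ===== PORT B =====
def validate_and_remove_pairs_alt (arr : List (List Int)) : List (List Int) :=
  ((arr.zip arr.tail).filter (fun p =>
      !(decide (PySem.List.pyGetD p.1 1 0 > PySem.List.pyGetD p.2 0 0) ||
        decide (PySem.List.pyGetD p.1 1 0 > PySem.List.pyGetD p.2 1 0)))).map Prod.fst
  ++ PySem.List.slice arr (some (-1)) none

-- ===== PRECONDITION & SPEC =====
-- Pre_ excludes exactly the inputs on which Python A raises IndexError: some consecutive
-- pair where arr[i] has fewer than 2 elements, arr[i+1] is empty, or (when the first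
-- comparison is False, so the second is evaluated) arr[i+1] has fewer than 2 elements.
def Pre_validate_and_remove_pairs (arr : List (List Int)) : Prop :=
  ∀ p ∈ arr.zip arr.tail,
    2 ≤ p.1.length ∧ 1 ≤ p.2.length ∧ (p.1.getD 1 0 > p.2.getD 0 0 ∨ 2 ≤ p.2.length)
instance (arr : List (List Int)) : Decidable (Pre_validate_and_remove_pairs arr) := by
  unfold Pre_validate_and_remove_pairs; infer_instance

def pvWitness_validate_and_remove_pairs : List (List Int) := [[1, 2], [3, 4], [2, 5]]

def Spec_validate_and_remove_pairs (arr : List (List Int)) (out : List (List Int)) : Prop := out = validate_and_remove_pairs_alt arr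
instance (arr : List (List Int)) (out : List (List Int)) : Decidable (Spec_validate_and_remove_pairs arr out) := by unfold Spec_validate_and_remove_pairs; infer_instance

-- ===== CLAIM (what is proved, stated in full; the proofs are below) =====
def Claim_equal_validate_and_remove_pairs : Prop := ∀ (arr : List (List Int)), Dom_validate_and_remove_pairs arr → Pre_validate_and_remove_pairs arr → Spec_validate_and_remove_pairs arr (validate_and_remove_pairs arr)

-- ===== LEMMAS AND PROOFS =====

-- semantic middle ground: keep each element iff ordered against its successor
def pvSpecF : List (List Int) → List (List Int)
  | [] => []
  | [a] => [a]
  | a :: b :: t =>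
      (if PySem.List.pyGetD a 1 0 > PySem.List.pyGetD b 0 0 ∨
          PySem.List.pyGetD a 1 0 > PySem.List.pyGetD b 1 0 then [] else [a]) ++ pvSpecF (b :: t)

lemma pvGetD_append_len {α : Type} (pre : List α) (a : α) (rest : List α) (d : α) :
    (pre ++ a :: rest).getD pre.length d = a := by
  induction pre with
  | nil => rfl
  | cons x xs ih => simpa using ih

lemma pvGetD_append_len_succ {α : Type} (pre : List α) (a : α) (rest : List α) (d : α) :
    (pre ++ a :: rest).getD (pre.length + 1) d = rest.getD 0 d := by
  induction pre with
  | nil => rfl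
  | cons x xs ih => simpa using ih

lemma pvEraseIdx_append_len {α : Type} (pre : List α) (a : α) (rest : List α) :
    (pre ++ a :: rest).eraseIdx pre.length = pre ++ rest := by
  induction pre with
  | nil => rfl
  | cons x xs ih => simpa using ih

lemma pvLoopA_eq (rest : List (List Int)) :
    ∀ pre : List (List Int), pvLoopA (pre ++ rest) pre.length = pre ++ pvSpecF rest := by
  induction rest with
  | nil =>
      intro pre
      rw [pvLoopA]
      simp [pvSpecF, PySem.List.len_eq]
  | cons a rest' ih =>
      intro pre
      cases rest' with
      | nil =>
          rw [pvLoopA]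
          have hguard : ¬ ((pre.length : Int) < PySem.List.len (pre ++ [a]) - 1) := by
            simp [PySem.List.len_eq]
          rw [dif_neg hguard]
          simp [pvSpecF]
      | cons b t =>
          rw [pvLoopA]
          have hlen : (pre ++ a :: b :: t).length = pre.length + (t.length + 2) := by
            simp
            try omega
          have hguard : ((pre.length : Int) < PySem.List.len (pre ++ a :: b :: t) - 1) := by
            simp [PySem.List.len_eq, hlen]; omega
          have hga : PySem.List.pyGetD (pre ++ a :: b :: t) (pre.length : Int) [] = a := by
            rw [PySem.List.pyGetD_natCast]; exact pvGetD_append_len pre a (b :: t) []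
          have hgb : PySem.List.pyGetD (pre ++ a :: b :: t) ((pre.length : Int) + 1) [] = b := by
            have h1 : ((pre.length : Int) + 1) = ((pre.length + 1 : Nat) : Int) := by push_cast; ring
            rw [h1, PySem.List.pyGetD_natCast]
            exact pvGetD_append_len_succ pre a (b :: t) []
          rw [dif_pos hguard, hga, hgb]
          by_cases hc : PySem.List.pyGetD a 1 0 > PySem.List.pyGetD b 0 0 ∨
              PySem.List.pyGetD a 1 0 > PySem.List.pyGetD b 1 0
          · rw [if_pos hc]
            have hlt : pre.length < (pre ++ a :: b :: t).length := by rw [hlen]; omega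
            have hpop : PySem.List.pop? (pre ++ a :: b :: t) (pre.length : Int) =
                some ((pre ++ a :: b :: t)[pre.length], (pre ++ a :: b :: t).eraseIdx pre.length) :=
              PySem.List.pop?_natCast _ _ hlt
            rw [hpop]
            simp only [pvEraseIdx_append_len pre a (b :: t)]
            rw [ih pre]
            simp [pvSpecF, hc]
          · rw [if_neg hc]
            have hstep : pvLoopA (pre ++ a :: b :: t) (pre.length + 1)
                = pvLoopA ((pre ++ [a]) ++ b :: t) (pre ++ [a]).length := by
              simp
            rw [hstep, ih (pre ++ [a])]
            simp [pvSpecF, hc]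

lemma pvAlt_eq (arr : List (List Int)) : validate_and_remove_pairs_alt arr = pvSpecF arr := by
  induction arr with
  | nil => rfl
  | cons a t ih =>
      cases t with
      | nil =>
          simp [validate_and_remove_pairs_alt, pvSpecF, PySem.List.slice_from_neg_one]
      | cons b t' =>
          unfold validate_and_remove_pairs_alt at ih ⊢
          have hsl : PySem.List.slice (a :: b :: t') (some (-1)) none
              = PySem.List.slice (b :: t') (some (-1)) none := by
            rw [PySem.List.slice_from_neg_one, PySem.List.slice_from_neg_one]
            simp [List.drop_succ_cons]
          rw [hsl]
          simp only [List.tail_cons] at ih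
          simp only [List.tail_cons, List.zip_cons_cons, List.filter_cons]
          by_cases hc : PySem.List.pyGetD a 1 0 > PySem.List.pyGetD b 0 0 ∨
              PySem.List.pyGetD a 1 0 > PySem.List.pyGetD b 1 0
          · have hb : (!(decide (PySem.List.pyGetD a 1 0 > PySem.List.pyGetD b 0 0) ||
                decide (PySem.List.pyGetD a 1 0 > PySem.List.pyGetD b 1 0))) = false := by
              rcases hc with h | h <;> simp [h]
            simp only [hb, Bool.false_eq_true, if_false]
            simp only [pvSpecF, if_pos hc, List.nil_append]
            exact ih
          · rw [not_or] at hc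
            have hb : (!(decide (PySem.List.pyGetD a 1 0 > PySem.List.pyGetD b 0 0) ||
                decide (PySem.List.pyGetD a 1 0 > PySem.List.pyGetD b 1 0))) = true := by
              simp [hc.1, hc.2]
            simp only [hb, if_true]
            simp only [pvSpecF, if_neg (not_or.mpr hc), List.map_cons, List.cons_append,
              List.nil_append]
            rw [ih]

-- ===== VERDICT (by name: the statement is the Claim_ definition above) =====
theorem validate_and_remove_pairs_spec : Claim_equal_validate_and_remove_pairs := by
  intro arr _ _
  unfold Spec_validate_and_remove_pairs validate_and_remove_pairs
  rw [pvAlt_eq]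
  simpa using pvLoopA_eq arr []
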